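-- pv_equiv track=rewrite | github.com/mupotsal/Programming_Practice_IGIT | file.py | rotateTheString
-- ===== SOURCE A (Python) =====
-- def rotate_string(originalString, start, end):
--     # originalString = list(originalString)
--     while (start < end):
--         temp = originalString[start]
--         originalString[start] = originalString[end]
--         originalString[end] = temp
--         start += 1
--         end = end - 1
--
-- def left_rotate(originalString, direction, amount):
--     if direction == 0:  # left rotation
--         if amount == 0:
--             return
--
--         n = len(originalString)
--         rotate_string(originalString, 0, amount - 1)
--         rotate_string(originalString, amount, n - 1)
--         rotate_string(originalString, 0, n - 1)
--
--     elif direction == 1: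
--         if amount == 0:
--             return
--         n = len(originalString)
--         rotate_string(originalString, 0, n - 1)
--         rotate_string(originalString, 0, amount - 1)
--         rotate_string(originalString, amount, n - 1)
--
-- def rotateTheString(originalString, direction, amount):
--     originalString = list(originalString)
--     for i in amount:
--         left_rotate(originalString, direction, i)
--     originalStrings = ""
--     for i in originalString:
--         originalStrings += i
--     return (originalStrings)
-- ===== SOURCE B (Python) =====
-- def rotateTheString(originalString, direction, amount):
--     n = len(originalString)
--     if n == 0:
--         return originalString
--     if direction == 0:
--         k = sum(amount) % n
--     elif direction == 1:
--         k = -sum(amount) % n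
--     else:
--         return originalString
--     return originalString[k:] + originalString[:k]
-- ===== Notes on version B (the rewrite author's own statement) =====
-- stated objective: faster
-- what changed: B sums all rotation amounts once, reduces the total modulo the length and performs a single slice-based rotation, instead of A's per-amount triple in-place reversal passes and character-by-character rebuild; Pre_ restricts amounts to the natural domain 0..len (A raises IndexError beyond len, and a negative amount is outside the function's natural domain -- direction already encodes the rotation's side -- where A's index wraparound happens to reverse a chunk instead of rotating).
-- outside the precondition, e.g. on rotateTheString('abc', 0, [-2]): A returns 'cba', B returns 'bca'; on rotateTheString('ab', 0, [3]): A raises IndexError, B returns 'ba'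
import Mathlib
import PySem

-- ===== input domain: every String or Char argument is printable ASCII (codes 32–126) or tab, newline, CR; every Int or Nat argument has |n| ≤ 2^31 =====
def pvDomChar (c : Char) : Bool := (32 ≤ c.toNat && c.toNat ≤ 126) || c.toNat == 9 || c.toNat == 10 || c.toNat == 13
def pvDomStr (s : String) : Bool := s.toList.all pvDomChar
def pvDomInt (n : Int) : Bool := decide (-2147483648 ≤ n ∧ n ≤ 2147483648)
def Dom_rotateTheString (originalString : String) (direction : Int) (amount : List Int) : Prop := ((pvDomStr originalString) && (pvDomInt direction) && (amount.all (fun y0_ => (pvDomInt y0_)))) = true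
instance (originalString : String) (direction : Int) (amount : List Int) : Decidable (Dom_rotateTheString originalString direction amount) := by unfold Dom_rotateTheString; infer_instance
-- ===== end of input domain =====

-- B sums the rotation amounts once, reduces modulo the length and does ONE slice rotation,
-- instead of A's three in-place reversal passes per amount; objective: faster (O(n+m) vs O(n·m)).

-- ===== PORT A =====
-- rotate_string: the in-place swap loop (IndexError = none; negative indices wrap as in Python)
def pvSwapLoop (xs : List Char) (s e : Int) : Option (List Char) :=
  if s < e then
    (PySem.List.pyGet? xs s).bind (fun temp =>
      (PySem.List.pyGet? xs e).bind (fun v =>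
        (PySem.List.pySet? xs s v).bind (fun xs1 =>
          (PySem.List.pySet? xs1 e temp).bind (fun xs2 =>
            pvSwapLoop xs2 (s + 1) (e - 1)))))
  else some xs
termination_by (e - s).toNat
decreasing_by omega

-- left_rotate: the three rotate_string calls per direction (n = len(originalString) inlined)
def pvLeftRotate (xs : List Char) (direction : Int) (amount : Int) : Option (List Char) :=
  if direction = 0 then
    if amount = 0 then some xs
    else
      (pvSwapLoop xs 0 (amount - 1)).bind (fun r1 =>
        (pvSwapLoop r1 amount ((xs.length : Int) - 1)).bind (fun r2 =>
          pvSwapLoop r2 0 ((xs.length : Int) - 1)))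
  else if direction = 1 then
    if amount = 0 then some xs
    else
      (pvSwapLoop xs 0 ((xs.length : Int) - 1)).bind (fun r1 =>
        (pvSwapLoop r1 0 (amount - 1)).bind (fun r2 =>
          pvSwapLoop r2 amount ((xs.length : Int) - 1)))
  else some xs

def rotateTheString (originalString : String) (direction : Int) (amount : List Int) : String :=
  match amount.foldl (fun acc i => acc.bind (fun xs => pvLeftRotate xs direction i))
      (some originalString.toList) with
  | none => ""   -- unreachable under Pre_ (the Python raises IndexError here)
  | some xs => String.ofList (xs.foldl (fun acc c => acc ++ [c]) [])

-- ===== PORT B =====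
def rotateTheString_alt (originalString : String) (direction : Int) (amount : List Int) : String :=
  let n : Int := (originalString.toList.length : Int)
  if n = 0 then originalString
  else if direction = 0 then
    let k := PySem.Int.mod (amount.foldl (· + ·) 0) n
    String.ofList (PySem.List.slice originalString.toList (some k) none ++
                   PySem.List.slice originalString.toList none (some k))
  else if direction = 1 then
    let k := PySem.Int.mod (-(amount.foldl (· + ·) 0)) n
    String.ofList (PySem.List.slice originalString.toList (some k) none ++
                   PySem.List.slice originalString.toList none (some k))
  else originalString

-- ===== PRECONDITION & SPEC =====
-- Pre_ restricts the amounts (when direction is 0 or 1) to the task's natural domain 0 .. max(len, 1):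
-- beyond max(len, 1) the Python A raises IndexError, and a NEGATIVE amount is outside the natural
-- domain of a rotation count (the direction parameter already encodes the side; there A's
-- negative-index wraparound happens to reverse a chunk of the string instead of rotating it).
def Pre_rotateTheString (originalString : String) (direction : Int) (amount : List Int) : Prop :=
  (direction = 0 ∨ direction = 1) →
    ∀ a ∈ amount, 0 ≤ a ∧ a ≤ max (originalString.toList.length : Int) 1
instance (originalString : String) (direction : Int) (amount : List Int) : Decidable (Pre_rotateTheString originalString direction amount) := by unfold Pre_rotateTheString; infer_instance

def pvWitness_rotateTheString : String × Int × List Int := ("abcde", 0, [2, 5, 1])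

def Spec_rotateTheString (originalString : String) (direction : Int) (amount : List Int) (out : String) : Prop := out = rotateTheString_alt originalString direction amount
instance (originalString : String) (direction : Int) (amount : List Int) (out : String) : Decidable (Spec_rotateTheString originalString direction amount out) := by unfold Spec_rotateTheString; infer_instance

-- ===== CLAIM (what is proved, stated in full; the proofs are below) =====
def Claim_equal_rotateTheString : Prop := ∀ (originalString : String) (direction : Int) (amount : List Int), Dom_rotateTheString originalString direction amount → Pre_rotateTheString originalString direction amount → Spec_rotateTheString originalString direction amount (rotateTheString originalString direction amount)

-- ===== LEMMAS AND PROOFS =====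

lemma pvGetCongr {α : Type} (xs : List α) {a b : ℕ} (hab : a = b) {ha : a < xs.length}
    {hb : b < xs.length} : xs[a]'ha = xs[b]'hb := by subst hab; rfl

lemma pvSwapLoop_stop (xs : List Char) {s e : Int} (h : ¬ s < e) : pvSwapLoop xs s e = some xs := by
  unfold pvSwapLoop; simp [h]

lemma pvSet?_nat (xs : List Char) (p : ℕ) (v : Char) (h : p < xs.length) :
    PySem.List.pySet? xs (p : Int) v = some (xs.set p v) := by
  simp only [PySem.List.pySet?, PySem.List.pyIdx?]
  rw [if_pos (by omega), if_pos (by exact_mod_cast h)]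
  simp

lemma pvSwapLoop_step_nat (xs : List Char) (s e : ℕ) (hse : s < e) (he : e < xs.length) :
    pvSwapLoop xs (s : Int) (e : Int) =
      pvSwapLoop ((xs.set s (xs[e]'he)).set e (xs[s]'(lt_trans hse he)))
        ((s : Int) + 1) ((e : Int) - 1) := by
  have hs : s < xs.length := lt_trans hse he
  rw [pvSwapLoop, if_pos (by exact_mod_cast hse)]
  simp only [PySem.List.pyGet?_natCast, List.getElem?_eq_getElem hs, List.getElem?_eq_getElem he,
    Option.bind_some]
  rw [pvSet?_nat xs s _ hs]
  simp only [Option.bind_some]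
  rw [pvSet?_nat _ e _ (by simpa using he)]
  simp only [Option.bind_some]

-- pieces of the swap-step algebra
lemma pvSS_take (xs : List Char) (s e : ℕ) (hse : s < e) (he : e < xs.length) :
    ((xs.set s (xs[e]'he)).set e (xs[s]'(lt_trans hse he))).take (s + 1)
      = xs.take s ++ [xs[e]'he] := by
  have hs : s < xs.length := lt_trans hse he
  apply List.ext_getElem
  · simp; omega
  · intro i h1 h2
    have hi : i ≤ s := by simp at h2; omega
    rw [List.getElem_take, List.getElem_set, List.getElem_set, List.getElem_append]
    by_cases his : i = s
    · subst his
      rw [if_neg (by omega), if_pos rfl, dif_neg (by simp), List.getElem_singleton]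
    · rw [if_neg (by omega), if_neg (by omega), dif_pos (by simp; omega), List.getElem_take]

lemma pvSS_drop (xs : List Char) (s e : ℕ) (hse : s < e) (he : e < xs.length) :
    ((xs.set s (xs[e]'he)).set e (xs[s]'(lt_trans hse he))).drop e
      = (xs[s]'(lt_trans hse he)) :: xs.drop (e + 1) := by
  apply List.ext_getElem
  · simp; omega
  · intro i h1 h2
    have hi : i < xs.length - e := by simpa using h1
    rw [List.getElem_drop, List.getElem_set, List.getElem_set]
    match i with
    | 0 =>
      rw [if_pos (by omega)]
      simp
    | Nat.succ j =>
      rw [if_neg (by omega), if_neg (by omega)]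
      simp only [List.getElem_cons_succ, List.getElem_drop]
      exact pvGetCongr xs (by omega)

lemma pvSS_mid (xs : List Char) (s e : ℕ) (a b : Char) (hse : s < e) :
    (((xs.set s a).set e b).take e).drop (s + 1) = (xs.take e).drop (s + 1) := by
  apply List.ext_getElem
  · simp
  · intro i h1 h2
    have hi : i < min e ((xs.set s a).set e b).length - (s + 1) := by simpa using h1
    rw [List.getElem_drop, List.getElem_take, List.getElem_set, List.getElem_set,
      if_neg (by omega), if_neg (by omega), List.getElem_drop, List.getElem_take]

lemma pvSeg_decomp (xs : List Char) (s e : ℕ) (hse : s < e) (he : e < xs.length) :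
    (xs.take (e + 1)).drop s
      = (xs[s]'(lt_trans hse he)) :: ((xs.take e).drop (s + 1) ++ [xs[e]'he]) := by
  rw [List.drop_take]
  rw [List.drop_eq_getElem_cons (show s < xs.length from lt_trans hse he)]
  rw [show e + 1 - s = (e - s) + 1 by omega, List.take_succ_cons]
  congr 1
  rw [List.drop_take]
  rw [show e - s = (e - (s + 1)) + 1 by omega]
  rw [List.take_add_one]
  congr 1
  have hlt : e - (s + 1) < (xs.drop (s + 1)).length := by simp; omega
  rw [List.getElem?_eq_getElem hlt]
  simp only [Option.toList_some, List.getElem_drop]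
  congr 1
  exact pvGetCongr xs (by omega)

-- segment reversal: pvSwapLoop on [s, e] with 0 ≤ s ≤ e+1, e < n reverses that segment
lemma pvSwapLoop_rev : ∀ (k : ℕ) (xs : List Char) (s e : ℕ), e + 1 - s = k → s ≤ e + 1 → e < xs.length →
    pvSwapLoop xs (s : Int) (e : Int) =
      some (xs.take s ++ ((xs.take (e + 1)).drop s).reverse ++ xs.drop (e + 1)) := by
  intro k
  induction k using Nat.strong_induction_on with
  | _ k ih =>
    intro xs s e hk hs he
    by_cases hse : s < e
    · rw [pvSwapLoop_step_nat xs s e hse he]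
      have h1 : ((s : Int) + 1) = ((s + 1 : ℕ) : Int) := by push_cast; ring
      have h2 : ((e : Int) - 1) = ((e - 1 : ℕ) : Int) := by omega
      rw [h1, h2]
      set xs' := (xs.set s (xs[e]'he)).set e (xs[s]'(lt_trans hse he)) with hxs'
      have hlen' : xs'.length = xs.length := by simp [hxs']
      rw [ih (e - 1 + 1 - (s + 1)) (by omega) xs' (s + 1) (e - 1) rfl (by omega) (by omega)]
      have he1 : e - 1 + 1 = e := by omega
      rw [he1]
      congr 1
      rw [hxs']
      rw [pvSS_take xs s e hse he, pvSS_drop xs s e hse he, pvSS_mid xs s e _ _ hse,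
        pvSeg_decomp xs s e hse he]
      simp [List.reverse_append]
    · -- s = e or s = e + 1: the loop does not run and the segment reversal is the identity
      rw [pvSwapLoop_stop xs (by exact_mod_cast hse)]
      congr 1
      by_cases hseq : s = e + 1
      · subst hseq
        simp
      · have hseq' : s = e := by omega
        subst hseq'
        have hdt : (xs.take (s + 1)).drop s = [xs[s]'he] := by
          rw [List.drop_take, show s + 1 - s = 1 by omega,
            List.drop_eq_getElem_cons he, List.take_succ_cons, List.take_zero]
        rw [hdt]
        have habc : xs.take s ++ [xs[s]'he] = xs.take (s + 1) := by
          rw [List.take_add_one]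
          simp [List.getElem?_eq_getElem he]
        simp only [List.reverse_singleton]
        rw [habc, List.take_append_drop]

-- start-0 corollary, in the literal shape of the calls in pvLeftRotate
lemma pvSwapLoop_rev0 (xs : List Char) (e : ℕ) (he : e < xs.length) :
    pvSwapLoop xs 0 ((e : ℕ) : Int) = some ((xs.take (e + 1)).reverse ++ xs.drop (e + 1)) := by
  have h := pvSwapLoop_rev (e + 1) xs 0 e (by omega) (by omega) he
  simpa using h

-- full reversal
lemma pvSwapLoop_full (xs : List Char) (h : 1 ≤ xs.length) :
    pvSwapLoop xs 0 ((xs.length : Int) - 1) = some xs.reverse := by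
  rw [show ((xs.length : Int) - 1) = ((xs.length - 1 : ℕ) : Int) by omega]
  rw [pvSwapLoop_rev0 xs (xs.length - 1) (by omega)]
  rw [show xs.length - 1 + 1 = xs.length by omega]
  simp [List.take_of_length_le]

lemma pvLeftRotate_nil (d a : Int) (hlo : 0 ≤ a) (hhi : a ≤ 1) :
    pvLeftRotate [] d a = some [] := by
  unfold pvLeftRotate
  simp only [List.length_nil, Nat.cast_zero]
  interval_cases a
  · split_ifs <;> simp_all
  · simp only [if_neg (show ¬(1 : Int) = 0 by decide)]
    split_ifs with hd0 hd1
    · rw [pvSwapLoop_stop _ (by decide), Option.bind_some,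
        pvSwapLoop_stop _ (by decide), Option.bind_some, pvSwapLoop_stop _ (by decide)]
    · rw [pvSwapLoop_stop _ (by decide), Option.bind_some,
        pvSwapLoop_stop _ (by decide), Option.bind_some, pvSwapLoop_stop _ (by decide)]
    · rfl

-- direction 0, positive amount: the three reversals amount to drop ++ take
lemma pvChainL_pos (xs : List Char) (a' : ℕ) (hn : 1 ≤ xs.length) (h1 : 1 ≤ a')
    (h2 : a' ≤ xs.length) :
    (pvSwapLoop xs 0 ((a' : Int) - 1)).bind (fun r1 =>
      (pvSwapLoop r1 (a' : Int) ((xs.length : Int) - 1)).bind (fun r2 =>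
        pvSwapLoop r2 0 ((xs.length : Int) - 1))) = some (xs.drop a' ++ xs.take a') := by
  rw [show ((a' : Int) - 1) = ((a' - 1 : ℕ) : Int) by omega]
  rw [pvSwapLoop_rev0 xs (a' - 1) (by omega), show a' - 1 + 1 = a' by omega]
  rw [Option.bind_some]
  set R1 := (xs.take a').reverse ++ xs.drop a' with hR1
  have hlen1 : R1.length = xs.length := by simp [hR1]; omega
  rw [show ((xs.length : Int) - 1) = ((xs.length - 1 : ℕ) : Int) by omega]
  rw [pvSwapLoop_rev (xs.length - 1 + 1 - a') R1 a' (xs.length - 1) rfl (by omega)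
    (by rw [hlen1]; omega)]
  rw [Option.bind_some, show xs.length - 1 + 1 = xs.length by omega]
  rw [show R1.take xs.length = R1 from List.take_of_length_le (by rw [hlen1])]
  rw [List.take_left' (by simp; omega), List.drop_left' (by simp; omega)]
  rw [show R1.drop xs.length = [] from List.drop_eq_nil_of_le (by rw [hlen1]), List.append_nil]
  set R2 := (xs.take a').reverse ++ (xs.drop a').reverse with hR2
  have hlen2 : R2.length = xs.length := by simp [hR2]; omega
  rw [pvSwapLoop_rev0 R2 (xs.length - 1) (by rw [hlen2]; omega),
    show xs.length - 1 + 1 = xs.length by omega]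
  rw [show R2.take xs.length = R2 from List.take_of_length_le (by rw [hlen2])]
  rw [show R2.drop xs.length = [] from List.drop_eq_nil_of_le (by rw [hlen2]), List.append_nil]
  rw [hR2]
  simp [List.reverse_append]

-- direction 1, positive amount: right rotation
lemma pvChainR_pos (xs : List Char) (a' : ℕ) (hn : 1 ≤ xs.length) (h1 : 1 ≤ a')
    (h2 : a' ≤ xs.length) :
    (pvSwapLoop xs 0 ((xs.length : Int) - 1)).bind (fun r1 =>
      (pvSwapLoop r1 0 ((a' : Int) - 1)).bind (fun r2 =>
        pvSwapLoop r2 (a' : Int) ((xs.length : Int) - 1))) =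
      some (xs.drop (xs.length - a') ++ xs.take (xs.length - a')) := by
  rw [pvSwapLoop_full xs hn, Option.bind_some]
  rw [show ((a' : Int) - 1) = ((a' - 1 : ℕ) : Int) by omega]
  rw [pvSwapLoop_rev0 xs.reverse (a' - 1) (by simp; omega), show a' - 1 + 1 = a' by omega]
  rw [Option.bind_some]
  set R2 := (xs.reverse.take a').reverse ++ xs.reverse.drop a' with hR2
  have hlen2 : R2.length = xs.length := by simp [hR2]; omega
  rw [show ((xs.length : Int) - 1) = ((xs.length - 1 : ℕ) : Int) by omega]
  rw [pvSwapLoop_rev (xs.length - 1 + 1 - a') R2 a' (xs.length - 1) rfl (by omega)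
    (by rw [hlen2]; omega)]
  rw [show xs.length - 1 + 1 = xs.length by omega]
  rw [show R2.take xs.length = R2 from List.take_of_length_le (by rw [hlen2])]
  rw [List.take_left' (by simp; omega), List.drop_left' (by simp; omega)]
  rw [show R2.drop xs.length = [] from List.drop_eq_nil_of_le (by rw [hlen2]), List.append_nil]
  rw [List.take_reverse, List.drop_reverse]
  simp

-- per-step characterisation: with 0 ≤ a ≤ n the step is a left rotation (List.rotate)
lemma pvLeftRotate_d0 (xs : List Char) (a : Int) (hn : 1 ≤ xs.length)
    (h0 : 0 ≤ a) (h1 : a ≤ (xs.length : Int)) :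
    pvLeftRotate xs 0 a = some (xs.rotate a.toNat) := by
  by_cases ha : a = 0
  · subst ha; simp [pvLeftRotate]
  · unfold pvLeftRotate
    rw [if_pos rfl, if_neg ha]
    rw [show a = ((a.toNat : ℕ) : Int) by omega]
    rw [pvChainL_pos xs a.toNat hn (by omega) (by omega)]
    rw [List.rotate_eq_drop_append_take (by omega)]
    rw [Int.toNat_natCast]

lemma pvLeftRotate_d1 (xs : List Char) (a : Int) (hn : 1 ≤ xs.length)
    (h0 : 0 ≤ a) (h1 : a ≤ (xs.length : Int)) :
    pvLeftRotate xs 1 a = some (xs.rotate (xs.length - a.toNat)) := by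
  by_cases ha : a = 0
  · subst ha
    simp [pvLeftRotate, List.rotate_length]
  · unfold pvLeftRotate
    rw [if_neg (show ¬(1 : Int) = 0 by decide), if_pos rfl, if_neg ha]
    rw [show a = ((a.toNat : ℕ) : Int) by omega]
    rw [pvChainR_pos xs a.toNat hn (by omega) (by omega)]
    rw [List.rotate_eq_drop_append_take (by omega)]
    rw [Int.toNat_natCast]

lemma pvLeftRotate_other (xs : List Char) (d a : Int) (h0 : ¬ d = 0) (h1 : ¬ d = 1) :
    pvLeftRotate xs d a = some xs := by
  simp [pvLeftRotate, h0, h1]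

-- fold of A's steps, direction 0: total left rotation by the sum of the (nonnegative) amounts
lemma pvFoldA_d0 : ∀ (l : List Int) (xs : List Char), 1 ≤ xs.length →
    (∀ a ∈ l, 0 ≤ a ∧ a ≤ (xs.length : Int)) →
    l.foldl (fun acc i => acc.bind (fun ys => pvLeftRotate ys 0 i)) (some xs) =
      some (xs.rotate (l.map Int.toNat).sum) := by
  intro l
  induction l with
  | nil => intro xs _ _; simp
  | cons a l ih =>
    intro xs hn hall
    have ha := hall a (by simp)
    simp only [List.foldl_cons, Option.bind_some,
      pvLeftRotate_d0 xs a hn ha.1 ha.2]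
    rw [ih (xs.rotate a.toNat) (by simpa using hn)
      (fun b hb => by simpa using hall b (by simp [hb]))]
    rw [List.rotate_rotate]
    simp

-- fold of A's steps, direction 1: each amount a contributes a left rotation by n - a
lemma pvFoldA_d1 : ∀ (l : List Int) (xs : List Char), 1 ≤ xs.length →
    (∀ a ∈ l, 0 ≤ a ∧ a ≤ (xs.length : Int)) →
    l.foldl (fun acc i => acc.bind (fun ys => pvLeftRotate ys 1 i)) (some xs) =
      some (xs.rotate (l.map (fun a => xs.length - a.toNat)).sum) := by
  intro l
  induction l with
  | nil => intro xs _ _; simp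
  | cons a l ih =>
    intro xs hn hall
    have ha := hall a (by simp)
    simp only [List.foldl_cons, Option.bind_some,
      pvLeftRotate_d1 xs a hn ha.1 ha.2]
    have hlen : (xs.rotate (xs.length - a.toNat)).length = xs.length := by simp
    rw [ih (xs.rotate (xs.length - a.toNat)) (by simpa using hn)
      (fun b hb => by simpa [hlen] using hall b (by simp [hb]))]
    rw [List.rotate_rotate]
    simp [hlen]

lemma pvFold_other : ∀ (l : List Int) (xs : List Char) (d : Int), ¬ d = 0 → ¬ d = 1 →
    l.foldl (fun acc i => acc.bind (fun ys => pvLeftRotate ys d i)) (some xs) = some xs := by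
  intro l
  induction l with
  | nil => intro xs d _ _; rfl
  | cons a l ih =>
    intro xs d h0 h1
    simp only [List.foldl_cons, Option.bind_some, pvLeftRotate_other xs d a h0 h1]
    exact ih xs d h0 h1

lemma pvFold_nil (l : List Int) (d : Int) (hall : ∀ a ∈ l, 0 ≤ a ∧ a ≤ 1) :
    l.foldl (fun acc i => acc.bind (fun ys => pvLeftRotate ys d i)) (some []) = some [] := by
  induction l with
  | nil => rfl
  | cons a l ih =>
    have ha := hall a (by simp)
    by_cases hd0 : d = 0
    · subst hd0
      simp only [List.foldl_cons, Option.bind_some, pvLeftRotate_nil 0 a ha.1 ha.2]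
      exact ih (fun b hb => hall b (by simp [hb]))
    · by_cases hd1 : d = 1
      · subst hd1
        simp only [List.foldl_cons, Option.bind_some, pvLeftRotate_nil 1 a ha.1 ha.2]
        exact ih (fun b hb => hall b (by simp [hb]))
      · simp only [List.foldl_cons, Option.bind_some, pvLeftRotate_other [] d a hd0 hd1]
        exact ih (fun b hb => hall b (by simp [hb]))

lemma pvFoldAppend_id : ∀ (l acc : List Char),
    l.foldl (fun acc c => acc ++ [c]) acc = acc ++ l := by
  intro l
  induction l with
  | nil => intro acc; simp
  | cons c l ih => intro acc; simp [ih]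

-- Python's sum is the foldl; shift the accumulator out
lemma pvFoldAdd_shift : ∀ (l : List Int) (c : Int), l.foldl (· + ·) c = c + l.foldl (· + ·) 0 := by
  intro l
  induction l with
  | nil => intro c; simp
  | cons a l ih =>
    intro c
    simp only [List.foldl_cons]
    rw [ih (c + a), ih (0 + a)]
    ring

-- the nat sum of the truncations casts to the int sum (all terms nonnegative)
lemma pvSumNat_cast : ∀ (l : List Int), (∀ a ∈ l, 0 ≤ a) →
    (((l.map Int.toNat).sum : ℕ) : Int) = l.foldl (· + ·) 0 := by
  intro l
  induction l with
  | nil => intro _; simp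
  | cons a l ih =>
    intro hall
    simp only [List.map_cons, List.sum_cons, List.foldl_cons]
    rw [pvFoldAdd_shift l (0 + a)]
    rw [Nat.cast_add, ih (fun b hb => hall b (by simp [hb]))]
    have := hall a (by simp)
    omega

-- the nat sum of the complements is length*n minus the int sum, modulo n
lemma pvSumComp_cast : ∀ (l : List Int) (n : ℕ), (∀ a ∈ l, 0 ≤ a ∧ a ≤ (n : Int)) →
    (((l.map (fun a => n - a.toNat)).sum : ℕ) : Int) = (l.length : Int) * n - l.foldl (· + ·) 0 := by
  intro l
  induction l with
  | nil => intro n _; simp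
  | cons a l ih =>
    intro n hall
    have ha := hall a (by simp)
    simp only [List.map_cons, List.sum_cons, List.foldl_cons, List.length_cons]
    rw [pvFoldAdd_shift l (0 + a)]
    rw [Nat.cast_add, ih n (fun b hb => hall b (by simp [hb]))]
    have h3 : ((n - a.toNat : ℕ) : Int) = (n : Int) - a := by omega
    rw [h3]
    push_cast
    ring

-- two rotations agree when the counts are congruent modulo the length (as ints)
lemma pvRotate_congr (xs : List Char) (p q : ℕ)
    (h : (p : Int) % (xs.length : Int) = (q : Int) % (xs.length : Int)) :
    xs.rotate p = xs.rotate q := by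
  rw [← List.rotate_mod xs p, ← List.rotate_mod xs q]
  congr 1
  have hp : ((p % xs.length : ℕ) : Int) = ((q % xs.length : ℕ) : Int) := by
    push_cast
    omega
  exact_mod_cast hp

-- B's slice pair is a rotation by k, for 0 ≤ k < n
lemma pvSliceRot (xs : List Char) (k : Int) (h0 : 0 ≤ k) (h1 : k ≤ (xs.length : Int)) :
    PySem.List.slice xs (some k) none ++ PySem.List.slice xs none (some k) =
      xs.rotate k.toNat := by
  rw [PySem.List.slice_from xs h0, PySem.List.slice_to xs h0]
  rw [List.rotate_eq_drop_append_take (by omega)]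

-- ===== VERDICT (by name: the statement is the Claim_ definition above) =====
theorem rotateTheString_spec : Claim_equal_rotateTheString := by
  intro s d am _ hpre
  unfold Spec_rotateTheString rotateTheString rotateTheString_alt
  by_cases hd : d = 0 ∨ d = 1
  · have hb := hpre hd
    by_cases hn0 : s.toList.length = 0
    · -- empty string: every admitted amount is 0 or 1 and every step is the identity
      have hxs : s.toList = [] := List.length_eq_zero_iff.mp hn0
      have hmax : max ((s.toList.length : ℕ) : Int) 1 = 1 := by rw [hn0]; norm_num
      rw [hxs]
      rw [pvFold_nil am d (fun a ha => by have := hb a ha; rw [hmax] at this; omega)]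
      rw [if_pos (show (([] : List Char).length : Int) = 0 by simp)]
      simp only [pvFoldAppend_id, List.append_nil]
      rw [← hxs]
      exact String.ofList_toList
    · have hn : 1 ≤ s.toList.length := by omega
      have hmax : max ((s.toList.length : ℕ) : Int) 1 = (s.toList.length : Int) :=
        max_eq_left (by exact_mod_cast hn)
      have hb' : ∀ a ∈ am, 0 ≤ a ∧ a ≤ (s.toList.length : Int) := by
        intro a ha; have := hb a ha; rw [hmax] at this; exact this
      have hne : ¬ ((s.toList.length : ℕ) : Int) = 0 := by omega
      have hposn : (0 : Int) < (s.toList.length : Int) := by omega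
      rcases hd with hd | hd <;> subst hd
      · rw [pvFoldA_d0 am s.toList hn hb']
        simp only [if_neg hne]
        rw [pvFoldAppend_id]
        set S := am.foldl (· + ·) 0 with hS
        set k := PySem.Int.mod S (s.toList.length : Int) with hk
        have hkmod : k = S % (s.toList.length : Int) :=
          PySem.Int.mod_eq_emod_of_pos hposn
        have hk0 : 0 ≤ k := by rw [hkmod]; exact Int.emod_nonneg S (by omega)
        have hk1 : k < (s.toList.length : Int) := by
          rw [hkmod]; exact Int.emod_lt_of_pos S hposn
        rw [pvSliceRot s.toList k hk0 (le_of_lt hk1)]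
        simp only [List.nil_append]
        congr 1
        apply pvRotate_congr
        rw [pvSumNat_cast am (fun a ha => (hb' a ha).1), ← hS]
        rw [show ((k.toNat : ℕ) : Int) = k by omega, hkmod, Int.emod_emod_of_dvd _ dvd_rfl]
      · rw [pvFoldA_d1 am s.toList hn hb']
        simp only [if_neg hne, if_neg (show ¬(1 : Int) = 0 by decide)]
        rw [pvFoldAppend_id]
        set S := am.foldl (· + ·) 0 with hS
        set k := PySem.Int.mod (-S) (s.toList.length : Int) with hk
        have hkmod : k = (-S) % (s.toList.length : Int) :=
          PySem.Int.mod_eq_emod_of_pos hposn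
        have hk0 : 0 ≤ k := by rw [hkmod]; exact Int.emod_nonneg (-S) (by omega)
        have hk1 : k < (s.toList.length : Int) := by
          rw [hkmod]; exact Int.emod_lt_of_pos (-S) hposn
        rw [pvSliceRot s.toList k hk0 (le_of_lt hk1)]
        simp only [List.nil_append]
        congr 1
        apply pvRotate_congr
        rw [pvSumComp_cast am s.toList.length hb', ← hS]
        rw [show ((k.toNat : ℕ) : Int) = k by omega, hkmod, Int.emod_emod_of_dvd _ dvd_rfl]
        rw [show (am.length : Int) * (s.toList.length : Int) - S
              = -S + (s.toList.length : Int) * (am.length : Int) by ring]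
        rw [Int.add_mul_emod_self_left]
  · push_neg at hd
    rw [pvFold_other am s.toList d hd.1 hd.2]
    simp only [pvFoldAppend_id]
    split_ifs <;> first
      | exact String.ofList_toList
      | (exact absurd ‹d = 0› hd.1)
      | (exact absurd ‹d = 1› hd.2)
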